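-- pv_equiv track=rewrite | github.com/minionworks/minions | src/minion_agent/browser/services/link_extraction.py | filter_links_by_relevance
-- ===== SOURCE A (Python) =====
-- from typing import List
--
-- def filter_links_by_relevance(links: List[str], current_domain: str, keywords: List[str]) -> List[str]:
--     """
--     Filter and sort links by their potential relevance to the search query.
--
--     Args:
--         links: List of URLs to filter
--         current_domain: The current domain we're on
--         keywords: Keywords to prioritize links by
--
--     Returns:
--         List[str]: Filtered and sorted list of URLs
--     """
--     # First, separate links by domain (same domain vs different domains)
--     same_domain_links = []
--     different_domain_links = []
--
--     for link in links:
--         if current_domain in link: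
--             same_domain_links.append(link)
--         else:
--             different_domain_links.append(link)
--
--     # Function to score a link based on keywords presence
--     def score_link(link):
--         link_lower = link.lower()
--         # Higher score if keywords appear in the URL
--         return sum(2 if keyword.lower() in link_lower else 0 for keyword in keywords)
--
--     # Sort links within each category by relevance score
--     same_domain_links.sort(key=score_link, reverse=True)
--     different_domain_links.sort(key=score_link, reverse=True)
--
--     # Prioritize same-domain links, but include some cross-domain links
--     # if they seem highly relevant
--     result = same_domain_links
--
--     # Add high-scoring different-domain links if they have keywords
--     relevant_external = [
--         link for link in different_domain_links
--         if score_link(link) > 0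
--     ][:5]  # Limit to top 5
--
--     result.extend(relevant_external)
--     return result
-- ===== SOURCE B (Python) =====
-- def filter_links_by_relevance(links, current_domain, keywords):
--     kws = [k.lower() for k in keywords]
--     max_score = 2 * len(kws)
--     # Counting/bucket sort: scores are bounded even integers in [0, 2*len(kws)],
--     # so instead of any comparison sort we drop each link (scored once) into the
--     # bucket of its score, then walk the buckets from highest score to lowest,
--     # splitting into same-domain and (up to 5 positive-score) external links.
--     buckets = [[] for _ in range(max_score + 1)]
--     for link in links:
--         ll = link.lower()
--         s = 2 * sum(1 for k in kws if k in ll)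
--         buckets[s].append(link)
--     same = []
--     ext = []
--     for s in range(max_score, -1, -1):
--         for link in buckets[s]:
--             if current_domain in link:
--                 same.append(link)
--             elif s > 0 and len(ext) < 5:
--                 ext.append(link)
--     return same + ext
-- ===== Notes on version B (the rewrite author's own statement) =====
-- stated objective: faster
-- what changed: B replaces A's two comparison sorts (with the k-keyword score recomputed on every key call) by a counting/bucket sort: each link is scored exactly once and dropped into the bucket of its score (scores are bounded even integers in [0, 2*len(keywords)]), then one walk over the buckets from highest score to lowest splits links into same-domain and up-to-5 positive-score external links.
import Mathlib
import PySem

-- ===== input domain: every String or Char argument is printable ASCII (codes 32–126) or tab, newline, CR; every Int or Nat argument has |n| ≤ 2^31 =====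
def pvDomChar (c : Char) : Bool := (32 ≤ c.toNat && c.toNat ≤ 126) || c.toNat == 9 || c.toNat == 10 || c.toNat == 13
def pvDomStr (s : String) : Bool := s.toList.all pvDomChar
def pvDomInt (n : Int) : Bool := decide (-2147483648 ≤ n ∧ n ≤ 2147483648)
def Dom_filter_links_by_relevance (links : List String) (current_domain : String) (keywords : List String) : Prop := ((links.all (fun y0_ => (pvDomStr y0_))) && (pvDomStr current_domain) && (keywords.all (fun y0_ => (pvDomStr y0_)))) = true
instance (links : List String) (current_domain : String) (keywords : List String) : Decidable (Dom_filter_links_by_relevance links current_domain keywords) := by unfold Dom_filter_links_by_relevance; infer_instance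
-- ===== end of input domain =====

-- B replaces A's two comparison sorts (score recomputed per key call) by a counting/bucket
-- sort over the bounded even scores, scoring each link once (measured faster).

-- ===== PORT A =====
-- score_link: sum(2 if keyword.lower() in link_lower else 0 for keyword in keywords)
def pvScoreA (keywords : List String) (link : String) : Int :=
  let link_lower := PySem.Str.lower link
  (keywords.map (fun keyword =>
    if PySem.Str.isIn (PySem.Str.lower keyword) link_lower then (2 : Int) else 0)).sum

def filter_links_by_relevance (links : List String) (current_domain : String) (keywords : List String) : List String :=
  -- the partition loop (two accumulators: same_domain_links, different_domain_links)
  let parts := links.foldl (fun (s : List String × List String) link =>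
      if PySem.Str.isIn current_domain link then (s.1 ++ [link], s.2)
      else (s.1, s.2 ++ [link])) ([], [])
  let same_domain_links := PySem.List.sorted parts.1 (pvScoreA keywords) true
  let different_domain_links := PySem.List.sorted parts.2 (pvScoreA keywords) true
  -- [link for link in different_domain_links if score_link(link) > 0][:5]
  let relevant_external :=
    (different_domain_links.filter (fun link => decide (pvScoreA keywords link > 0))).take 5
  same_domain_links ++ relevant_external

-- ===== PORT B =====
-- s = 2 * sum(1 for k in kws if k in ll): nonnegative by construction, so a Nat is exact
def pvKeyNat (kws : List String) (link : String) : Nat :=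
  let ll := PySem.Str.lower link
  2 * (kws.filter (fun k => PySem.Str.isIn k ll)).length

def filter_links_by_relevance_alt (links : List String) (current_domain : String) (keywords : List String) : List String :=
  let kws := keywords.map PySem.Str.lower
  let m := 2 * kws.length
  -- buckets = [[] for _ in range(max_score+1)]; buckets[s].append(link)
  let buckets := links.foldl (fun (B : List (List String)) link =>
      B.modify (pvKeyNat kws link) (fun b => b ++ [link])) (List.replicate (m + 1) [])
  -- for s in range(max_score, -1, -1): … — this range is exactly m, m-1, …, 0, all nonnegative,
  -- so (List.range (m+1)).reverse enumerates the same indices (exact)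
  let r := ((List.range (m + 1)).reverse).foldl (fun (st : List String × List String) s =>
      (buckets.getD s []).foldl (fun (st : List String × List String) link =>
        if PySem.Str.isIn current_domain link then (st.1 ++ [link], st.2)
        else if decide (0 < s) && decide (st.2.length < 5) then (st.1, st.2 ++ [link])
        else st) st) ([], [])
  r.1 ++ r.2

-- ===== PRECONDITION & SPEC =====
def Spec_filter_links_by_relevance (links : List String) (current_domain : String) (keywords : List String) (out : List String) : Prop := out = filter_links_by_relevance_alt links current_domain keywords
instance (links : List String) (current_domain : String) (keywords : List String) (out : List String) : Decidable (Spec_filter_links_by_relevance links current_domain keywords out) := by unfold Spec_filter_links_by_relevance; infer_instance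

-- ===== CLAIM (what is proved, stated in full; the proofs are below) =====
def Claim_equal_filter_links_by_relevance : Prop := ∀ (links : List String) (current_domain : String) (keywords : List String), Dom_filter_links_by_relevance links current_domain keywords → Spec_filter_links_by_relevance links current_domain keywords (filter_links_by_relevance links current_domain keywords)

-- ===== LEMMAS AND PROOFS =====

-- A's Int score is twice B's match count (keywords pre-lowered)
theorem pvScore_aux (ll : String) (t : List String) :
    (t.map (fun keyword => if PySem.Str.isIn (PySem.Str.lower keyword) ll then (2 : Int) else 0)).sum
      = 2 * (((t.map PySem.Str.lower).filter (fun k => PySem.Str.isIn k ll)).length : Int) := by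
  induction t with
  | nil => rfl
  | cons k t ih =>
    simp only [List.map_cons, List.sum_cons, List.filter_cons]
    by_cases h : PySem.Str.isIn (PySem.Str.lower k) ll = true
    · simp only [h, if_pos, List.length_cons, ih]; push_cast; ring
    · simp only [h, Bool.false_eq_true, if_false, ih, zero_add]

theorem pvScore_eq_key (keywords : List String) (link : String) :
    pvScoreA keywords link = ((pvKeyNat (keywords.map PySem.Str.lower) link : Nat) : Int) := by
  unfold pvScoreA pvKeyNat
  rw [pvScore_aux]
  push_cast
  ring

theorem pvKey_le (kws : List String) (link : String) : pvKeyNat kws link ≤ 2 * kws.length := by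
  have h := List.length_filter_le (fun k => PySem.Str.isIn k (PySem.Str.lower link)) kws
  show 2 * (kws.filter (fun k => PySem.Str.isIn k (PySem.Str.lower link))).length ≤ 2 * kws.length
  omega

-- generic insertBy facts
theorem pvInsertBy_head {α : Type} (before : α → α → Bool) (x : α) (l : List α)
    (h : ∀ y ∈ l, before x y = true) :
    PySem.List.insertBy before x l = x :: l := by
  cases l with
  | nil => rfl
  | cons y ys => simp [PySem.List.insertBy, h y (List.mem_cons_self ..)]

theorem pvInsertBy_append_left {α : Type} (before : α → α → Bool) (x : α) (l1 l2 : List α)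
    (h : ∀ y ∈ l1, before x y = false) :
    PySem.List.insertBy before x (l1 ++ l2) = l1 ++ PySem.List.insertBy before x l2 := by
  induction l1 with
  | nil => rfl
  | cons y ys ih =>
    have hy := h y (List.mem_cons_self ..)
    simp only [List.cons_append, PySem.List.insertBy, hy, Bool.false_eq_true, if_false]
    rw [ih (fun z hz => h z (List.mem_cons_of_mem _ hz))]

theorem pvInsertBy_congr {α : Type} (b1 b2 : α → α → Bool) (x : α) (l : List α)
    (h : ∀ a b, b1 a b = b2 a b) :
    PySem.List.insertBy b1 x l = PySem.List.insertBy b2 x l := by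
  induction l with
  | nil => rfl
  | cons y ys ih => simp only [PySem.List.insertBy, h, ih]

-- filtering commutes with inserting into a key-descending list (A side)
theorem pvInsertBy_filter {α : Type} (key : α → Int) (p : α → Bool) (x : α) (l : List α)
    (h : l.Pairwise (fun a b => key b ≤ key a)) :
    (PySem.List.insertBy (fun a b => decide (key b < key a)) x l).filter p
      = if p x then PySem.List.insertBy (fun a b => decide (key b < key a)) x (l.filter p)
        else l.filter p := by
  induction l with
  | nil =>
    simp [PySem.List.insertBy, List.filter]
    by_cases hx : p x = true <;> simp [hx]
  | cons y ys ih =>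
    rw [List.pairwise_cons] at h
    obtain ⟨hy, hys⟩ := h
    by_cases hb : key y < key x
    · simp only [PySem.List.insertBy, decide_eq_true_eq, if_pos hb]
      by_cases hx : p x = true
      · by_cases hpy : p y = true
        · simp [hx, hpy, PySem.List.insertBy, hb]
        · simp only [Bool.not_eq_true] at hpy
          simp only [List.filter_cons, hx, hpy, if_true]
          have hall : ∀ z ∈ List.filter p ys, decide (key z < key x) = true := by
            intro z hz
            have := hy z (List.mem_of_mem_filter hz)
            simp only [decide_eq_true_eq]
            omega
          rw [pvInsertBy_head _ _ _ hall]
      · simp only [Bool.not_eq_true] at hx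
        simp [List.filter_cons, hx]
    · have hb' : decide (key y < key x) = false := by simp; omega
      simp only [PySem.List.insertBy, hb', Bool.false_eq_true, if_false]
      by_cases hpy : p y = true
      · simp only [List.filter_cons, hpy, if_true]
        rw [ih hys]
        by_cases hx : p x = true
        · simp only [hx, if_true]
          simp [PySem.List.insertBy, hb']
        · simp [hx]
      · simp only [Bool.not_eq_true] at hpy
        simp only [List.filter_cons, hpy]
        rw [ih hys]
        simp

theorem pvSorted_rev_snoc {α : Type} (xs : List α) (x : α) (key : α → Int) :
    PySem.List.sorted (xs ++ [x]) key true
      = PySem.List.insertBy (fun a b => decide (key b < key a)) x (PySem.List.sorted xs key true) := by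
  rw [PySem.List.sorted_rev_eq_foldl_insertBy, PySem.List.sorted_rev_eq_foldl_insertBy,
    List.foldl_append, List.foldl_cons, List.foldl_nil]

-- a stable descending sort commutes with filter (A side)
theorem pvSorted_filter {α : Type} (key : α → Int) (p : α → Bool) (xs : List α) :
    (PySem.List.sorted xs key true).filter p = PySem.List.sorted (xs.filter p) key true := by
  induction xs using List.reverseRecOn with
  | nil => rfl
  | append_singleton xs x ih =>
    rw [pvSorted_rev_snoc, pvInsertBy_filter key p x _ (PySem.List.sorted_pairwise_rev xs key), ih,
      List.filter_append]
    by_cases hx : p x = true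
    · simp [hx, pvSorted_rev_snoc]
    · simp [hx]

-- the capped append loop collects the first 5 filtered elements
theorem pvTake_loop {α : Type} (p : α → Bool) (l : List α) (acc : List α) :
    l.foldl (fun acc x => if p x && decide (acc.length < 5) then acc ++ [x] else acc) acc
      = acc ++ (l.filter p).take (5 - acc.length) := by
  induction l generalizing acc with
  | nil => simp
  | cons x t ih =>
    rw [List.foldl_cons]
    by_cases hp : p x = true
    · by_cases hl : acc.length < 5
      · have hc : (p x && decide (acc.length < 5)) = true := by simp [hp, hl]
        rw [hc, if_pos rfl, ih]
        simp only [List.filter_cons, hp, if_pos]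
        have h1 : 5 - acc.length = (5 - (acc ++ [x]).length) + 1 := by
          simp only [List.length_append, List.length_cons, List.length_nil]
          omega
        rw [h1, List.take_succ_cons, List.append_assoc, List.singleton_append]
      · have hc : (p x && decide (acc.length < 5)) = false := by simp [hl]
        rw [hc, if_neg (by simp), ih]
        have h5 : 5 - acc.length = 0 := by omega
        rw [h5]
        simp
    · have hc : (p x && decide (acc.length < 5)) = false := by simp [hp]
      rw [hc, if_neg (by simp), ih]
      simp [hp]

-- ===== bucket machinery (B side) =====

-- buckets m, m-1, …, 0 concatenated
def pvFlatDesc (B : List (List String)) : Nat → List String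
  | 0 => []
  | Nat.succ s => B.getD s [] ++ pvFlatDesc B s

-- the same traversal with each link paired with its bucket index
def pvPairs (B : List (List String)) : Nat → List (String × Nat)
  | 0 => []
  | Nat.succ s => (B.getD s []).map (fun l => (l, s)) ++ pvPairs B s

-- every element of bucket i has score i
def pvGood (kws : List String) (B : List (List String)) : Prop :=
  ∀ (i : Nat) (x : String), x ∈ B.getD i [] → pvKeyNat kws x = i

theorem pvGetD_modify_ne (B : List (List String)) (f : List String → List String)
    (i j : Nat) (h : i ≠ j) : (B.modify i f).getD j [] = B.getD j [] := by
  simp only [List.getD_eq_getElem?_getD, List.getElem?_modify]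
  cases B[j]? <;> simp [h]

theorem pvGetD_modify_self (B : List (List String)) (f : List String → List String)
    (i : Nat) (h : i < B.length) : (B.modify i f).getD i [] = f (B.getD i []) := by
  simp [List.getD_eq_getElem?_getD, List.getElem?_eq_getElem h]


theorem pvFlatDesc_congr (B1 B2 : List (List String)) (n : Nat)
    (h : ∀ s < n, B1.getD s [] = B2.getD s []) : pvFlatDesc B1 n = pvFlatDesc B2 n := by
  induction n with
  | zero => rfl
  | succ s ih =>
    simp only [pvFlatDesc, h s (Nat.lt_succ_self s)]
    rw [ih (fun t ht => h t (Nat.lt_succ_of_lt ht))]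

theorem pvMem_flatDesc (B : List (List String)) (n : Nat) (y : String)
    (h : y ∈ pvFlatDesc B n) : ∃ s, s < n ∧ y ∈ B.getD s [] := by
  induction n with
  | zero => cases h
  | succ s ih =>
    simp only [pvFlatDesc, List.mem_append] at h
    rcases h with h | h
    · exact ⟨s, Nat.lt_succ_self s, h⟩
    · obtain ⟨t, ht, hy⟩ := ih h
      exact ⟨t, Nat.lt_succ_of_lt ht, hy⟩

-- appending into bucket (key x) is an ordered insertion into the flattened list
theorem pvFlat_modify (kws : List String) (B : List (List String)) (x : String) (n : Nat)
    (hn : pvKeyNat kws x < n) (hlen : pvKeyNat kws x < B.length) (hg : pvGood kws B) :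
    pvFlatDesc (B.modify (pvKeyNat kws x) (fun b => b ++ [x])) n
      = PySem.List.insertBy (fun a b => decide (pvKeyNat kws b < pvKeyNat kws a)) x
          (pvFlatDesc B n) := by
  induction n with
  | zero => omega
  | succ t ih =>
    by_cases hk : pvKeyNat kws x = t
    · -- x lands in the topmost bucket of this suffix
      simp only [pvFlatDesc]
      rw [hk] at hlen ⊢
      rw [pvGetD_modify_self B _ t hlen,
        pvFlatDesc_congr (B.modify t (fun b => b ++ [x])) B t
          (fun s hs => pvGetD_modify_ne B _ t s (by omega)),
        pvInsertBy_append_left _ _ _ _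
          (fun y hy => by
            have := hg t y hy
            simp only [decide_eq_false_iff_not, not_lt]
            omega),
        pvInsertBy_head _ _ _
          (fun y hy => by
            obtain ⟨s, hs, hy'⟩ := pvMem_flatDesc B t y hy
            have := hg s y hy'
            simp only [decide_eq_true_eq]
            omega)]
      simp
    · -- x belongs strictly below bucket t
      have hk' : pvKeyNat kws x < t := by omega
      simp only [pvFlatDesc]
      rw [pvGetD_modify_ne B _ _ t (by omega), ih hk',
        pvInsertBy_append_left _ _ _ _
          (fun y hy => by
            have := hg t y hy
            simp only [decide_eq_false_iff_not, not_lt]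
            omega)]

theorem pvGood_modify (kws : List String) (B : List (List String)) (x : String)
    (hlen : pvKeyNat kws x < B.length) (hg : pvGood kws B) :
    pvGood kws (B.modify (pvKeyNat kws x) (fun b => b ++ [x])) := by
  intro i y hy
  by_cases hk : pvKeyNat kws x = i
  · subst hk
    rw [pvGetD_modify_self B _ _ hlen, List.mem_append, List.mem_singleton] at hy
    rcases hy with hy | hy
    · exact hg _ y hy
    · rw [hy]
  · rw [pvGetD_modify_ne B _ _ i hk] at hy
    exact hg i y hy

-- the whole bucket-filling loop is an insertion sort of the flattened list
theorem pvFold_buckets (kws : List String) (links : List String) :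
    ∀ (B : List (List String)) (acc : List String), pvGood kws B →
      B.length = 2 * kws.length + 1 → pvFlatDesc B (2 * kws.length + 1) = acc →
      pvFlatDesc (links.foldl (fun B link =>
          B.modify (pvKeyNat kws link) (fun b => b ++ [link])) B) (2 * kws.length + 1)
        = links.foldl (fun acc x =>
            PySem.List.insertBy (fun a b => decide (pvKeyNat kws b < pvKeyNat kws a)) x acc) acc
      ∧ pvGood kws (links.foldl (fun B link =>
          B.modify (pvKeyNat kws link) (fun b => b ++ [link])) B)
      ∧ (links.foldl (fun B link =>
          B.modify (pvKeyNat kws link) (fun b => b ++ [link])) B).length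
          = 2 * kws.length + 1 := by
  induction links with
  | nil => intro B acc hg hlen hacc; exact ⟨hacc, hg, hlen⟩
  | cons x t ih =>
    intro B acc hg hlen hacc
    have hx : pvKeyNat kws x < B.length := by
      have := pvKey_le kws x; omega
    have hx' : pvKeyNat kws x < 2 * kws.length + 1 := by
      have := pvKey_le kws x; omega
    simp only [List.foldl_cons]
    exact ih (B.modify (pvKeyNat kws x) (fun b => b ++ [x]))
      (PySem.List.insertBy (fun a b => decide (pvKeyNat kws b < pvKeyNat kws a)) x acc)
      (pvGood_modify kws B x hx hg)
      (by rw [List.length_modify]; exact hlen)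
      (by rw [pvFlat_modify kws B x _ hx' hx hg, hacc])

theorem pvGetD_replicate (n i : Nat) :
    (List.replicate n ([] : List String)).getD i [] = [] := by
  simp only [List.getD_eq_getElem?_getD, List.getElem?_replicate]
  split <;> rfl

theorem pvFlatDesc_replicate (n m : Nat) :
    pvFlatDesc (List.replicate m ([] : List String)) n = [] := by
  induction n with
  | zero => rfl
  | succ s ih => simp [pvFlatDesc, ih]


-- the two insertion orders agree: Nat keys vs their Int casts
theorem pvSorted_key_eq (links : List String) (keywords : List String) :
    (links.foldl (fun acc x =>
        PySem.List.insertBy (fun a b =>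
          decide (pvKeyNat (keywords.map PySem.Str.lower) b
            < pvKeyNat (keywords.map PySem.Str.lower) a)) x acc) [])
      = PySem.List.sorted links (pvScoreA keywords) true := by
  rw [PySem.List.sorted_rev_eq_foldl_insertBy]
  apply PySem.List.foldl_congr_mem
  intro acc x _
  apply pvInsertBy_congr
  intro a b
  simp only [pvScore_eq_key, Nat.cast_lt]

-- double fold over descending buckets = single fold over the (link, score) pair list
theorem pvFold_pairs {σ : Type} (B : List (List String)) (g : Nat → σ → String → σ) :
    ∀ (n : Nat) (init : σ),
      ((List.range n).reverse).foldl (fun st s => (B.getD s []).foldl (g s) st) init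
        = (pvPairs B n).foldl (fun st t => g t.2 st t.1) init := by
  intro n
  induction n with
  | zero => intro init; rfl
  | succ s ih =>
    intro init
    rw [List.range_succ, List.reverse_append, List.reverse_singleton, List.singleton_append,
      List.foldl_cons, ih]
    simp only [pvPairs, List.foldl_append, List.foldl_map]

theorem pvMem_pairs (B : List (List String)) (n : Nat) (t : String × Nat)
    (h : t ∈ pvPairs B n) : t.1 ∈ B.getD t.2 [] := by
  induction n with
  | zero => cases h
  | succ s ih =>
    simp only [pvPairs, List.mem_append, List.mem_map] at h
    rcases h with ⟨l, hl, ht⟩ | h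
    · cases ht; simpa using hl
    · exact ih h

theorem pvPairs_map_fst (B : List (List String)) (n : Nat) :
    (pvPairs B n).map Prod.fst = pvFlatDesc B n := by
  induction n with
  | zero => rfl
  | succ s ih =>
    simp only [pvPairs, pvFlatDesc, List.map_append, List.map_map, ih]
    congr 1
    simp [Function.comp_def]

-- ===== VERDICT (by name: the statement is the Claim_ definition above) =====
theorem filter_links_by_relevance_spec : Claim_equal_filter_links_by_relevance := by
  intro links current_domain keywords _
  show filter_links_by_relevance links current_domain keywords
      = filter_links_by_relevance_alt links current_domain keywords
  have kws := keywords.map PySem.Str.lower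
  -- the canonical form both programs reduce to
  -- A side
  have hA : filter_links_by_relevance links current_domain keywords
      = (PySem.List.sorted links (pvScoreA keywords) true).filter
          (fun l => PySem.Str.isIn current_domain l)
        ++ ((PySem.List.sorted links (pvScoreA keywords) true).filter
          (fun l => !PySem.Str.isIn current_domain l && decide (0 < pvScoreA keywords l))).take 5 := by
    simp only [filter_links_by_relevance]
    have h1 : ∀ (acc : List String × List String), ∀ x ∈ links,
        (if PySem.Str.isIn current_domain x then (acc.1 ++ [x], acc.2) else (acc.1, acc.2 ++ [x]))
        = ((if PySem.Str.isIn current_domain x then acc.1 ++ [x] else acc.1),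
           (if !PySem.Str.isIn current_domain x then acc.2 ++ [x] else acc.2)) := by
      intro acc x _
      cases h : PySem.Str.isIn current_domain x <;> simp
    rw [PySem.List.foldl_congr_mem links _ _ ([], []) h1,
      PySem.List.foldl_prod_mk
        (f := fun a (x : String) => if PySem.Str.isIn current_domain x then a ++ [x] else a)
        (g := fun a (x : String) => if !PySem.Str.isIn current_domain x then a ++ [x] else a),
      PySem.List.foldl_append_if_eq_filter, PySem.List.foldl_append_if_eq_filter, List.nil_append,
      List.nil_append, ← pvSorted_filter (pvScoreA keywords)
        (fun l => PySem.Str.isIn current_domain l) links,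
      ← pvSorted_filter (pvScoreA keywords)
        (fun l => !PySem.Str.isIn current_domain l) links,
      List.filter_filter]
    congr 2
    apply List.filter_congr
    intro x _
    rw [Bool.and_comm]
  -- B side
  have hB : filter_links_by_relevance_alt links current_domain keywords
      = (PySem.List.sorted links (pvScoreA keywords) true).filter
          (fun l => PySem.Str.isIn current_domain l)
        ++ ((PySem.List.sorted links (pvScoreA keywords) true).filter
          (fun l => !PySem.Str.isIn current_domain l && decide (0 < pvScoreA keywords l))).take 5 := by
    simp only [filter_links_by_relevance_alt]
    obtain ⟨hflat, hgood, hlen⟩ :=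
      pvFold_buckets (keywords.map PySem.Str.lower) links
        (List.replicate (2 * (keywords.map PySem.Str.lower).length + 1) []) []
        (fun i x hx => by rw [pvGetD_replicate] at hx; cases hx)
        (by simp) (pvFlatDesc_replicate _ _)
    set kws := keywords.map PySem.Str.lower with hkws
    set buckets := links.foldl (fun B link =>
        B.modify (pvKeyNat kws link) (fun b => b ++ [link]))
        (List.replicate (2 * kws.length + 1) []) with hbuckets
    rw [pvFold_pairs buckets
      (fun s st link =>
        if PySem.Str.isIn current_domain link then (st.1 ++ [link], st.2)
        else if decide (0 < s) && decide (st.2.length < 5) then (st.1, st.2 ++ [link])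
        else st)]
    -- replace the bucket index by the link's score, then split the pair accumulator
    have h2 : ∀ (st : List String × List String), ∀ t ∈ pvPairs buckets (2 * kws.length + 1),
        (if PySem.Str.isIn current_domain t.1 then (st.1 ++ [t.1], st.2)
         else if decide (0 < t.2) && decide (st.2.length < 5) then (st.1, st.2 ++ [t.1])
         else st)
        = ((if PySem.Str.isIn current_domain t.1 then st.1 ++ [t.1] else st.1),
           (if (!PySem.Str.isIn current_domain t.1 && decide (0 < pvScoreA keywords t.1))
              && decide (st.2.length < 5) then st.2 ++ [t.1] else st.2)) := by
      intro st t ht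
      have hkey : pvKeyNat kws t.1 = t.2 := hgood t.2 t.1 (pvMem_pairs _ _ t ht)
      have hsc : decide (0 < t.2) = decide (0 < pvScoreA keywords t.1) := by
        rw [pvScore_eq_key, ← hkws, hkey]
        simp
      rw [← hsc]
      cases h : PySem.Str.isIn current_domain t.1
      · simp only [Bool.false_eq_true, if_false, Bool.not_false, Bool.true_and]
        split_ifs <;> rfl
      · simp
    rw [PySem.List.foldl_congr_mem _ _ _ ([], []) h2,
      PySem.List.foldl_prod_mk
        (f := fun a (t : String × Nat) =>
          if PySem.Str.isIn current_domain t.1 then a ++ [t.1] else a)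
        (g := fun a (t : String × Nat) =>
          if (!PySem.Str.isIn current_domain t.1 && decide (0 < pvScoreA keywords t.1))
            && decide (a.length < 5) then a ++ [t.1] else a)]
    -- both components only look at t.1: fold over the flattened (sorted) link list
    have hmap : ∀ (f : List String → String → List String) (init : List String),
        (pvPairs buckets (2 * kws.length + 1)).foldl (fun a t => f a t.1) init
          = (pvFlatDesc buckets (2 * kws.length + 1)).foldl f init := by
      intro f init
      rw [← pvPairs_map_fst, List.foldl_map]
    rw [hmap (fun a l => if PySem.Str.isIn current_domain l then a ++ [l] else a),
      hmap (fun a l =>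
        if (!PySem.Str.isIn current_domain l && decide (0 < pvScoreA keywords l))
          && decide (a.length < 5) then a ++ [l] else a),
      hflat, pvSorted_key_eq links keywords,
      PySem.List.foldl_append_if_eq_filter,
      pvTake_loop (fun l =>
        !PySem.Str.isIn current_domain l && decide (0 < pvScoreA keywords l))]
    rfl
  rw [hA, hB]
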